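-- pv_equiv track=rewrite | github.com/physicistphil/bapsf-hdf5-utils | utils/h5Parse.py | NDSliceToLinear
-- ===== SOURCE A (Python) =====
-- def NDSliceToLinear(slice_tuple,forShape) : # - written 8/10/2016
--   """
--   Takes an input slice_tuple, which is a tuple of lists of indices, and converts it to a single list of linear indices
--
--   For example. If working with an object with shape (4,3,2) and I want the indices corresponding to the 4 points ([1,2],[0,1],[1]),
--   the input is ([1,2],[0,1],1]) and the output is
--   [7, 9, 13, 15] for an object with shape (24,)
--
--   Since the HDF5 stores an array of size (Nx*Nz*Nshots,Nt) where Nx are the number x positions, Nz - z positions, Nshots - shots at each position, Nt - number of times, which corresponds to a real array of shape (Nz, Nx, Nshots, Nt),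
--   this is the conversion if I want to grab the set of z positions, x positions, and shots
--   """
--   maxPrevSize = 1
--   nd_slice = len(slice_tuple)
--   temp = slice_tuple[nd_slice-1]
--
--   for it in range(nd_slice-2,-1,-1) :
--     prev = temp[:]
--     temp = []
--     maxPrevSize *= forShape[it+1]
--     for jt in range(len(slice_tuple[it])) :
--       temp += [x+slice_tuple[it][jt]*maxPrevSize for x in prev]
--   return temp
-- ===== SOURCE B (Python) =====
-- def NDSliceToLinear(slice_tuple, forShape):
--     # stride table built in one backward pass, then one forward pass over the
--     # dimensions expanding the Cartesian product of offsets
--     nd = len(slice_tuple)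
--     strides = [1]
--     for d in range(nd - 2, -1, -1):
--         strides.insert(0, strides[0] * forShape[d + 1])
--     offsets = [0]
--     for idxs, stride in zip(slice_tuple, strides):
--         offsets = [base + i * stride for base in offsets for i in idxs]
--     return offsets
-- ===== Notes on version B (the rewrite author's own statement) =====
-- stated objective: simpler
-- what changed: B first builds the stride table in one backward pass, then expands the offsets dimension by dimension in a single forward comprehension over (index-list, stride) pairs, instead of A's backward loop that re-derives the multiplier on the fly and rebuilds the list with an inner index loop and += concatenations.
import Mathlib
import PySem

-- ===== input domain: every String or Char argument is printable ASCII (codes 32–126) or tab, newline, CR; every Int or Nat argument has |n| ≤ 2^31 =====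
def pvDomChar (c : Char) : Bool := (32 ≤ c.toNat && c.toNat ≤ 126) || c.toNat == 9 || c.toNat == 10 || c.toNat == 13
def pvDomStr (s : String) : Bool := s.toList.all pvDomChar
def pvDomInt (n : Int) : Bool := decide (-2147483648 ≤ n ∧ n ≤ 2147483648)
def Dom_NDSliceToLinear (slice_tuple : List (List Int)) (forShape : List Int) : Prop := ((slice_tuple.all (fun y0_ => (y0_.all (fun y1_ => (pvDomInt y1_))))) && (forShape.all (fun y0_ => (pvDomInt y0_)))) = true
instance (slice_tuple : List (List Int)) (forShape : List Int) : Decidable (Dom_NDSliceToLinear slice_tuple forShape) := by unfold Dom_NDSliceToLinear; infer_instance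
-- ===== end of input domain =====

-- B precomputes the stride table in a backward pass and then expands the offsets in one
-- forward pass over (index-list, stride) pairs, instead of A's backward rebuild with an
-- on-the-fly multiplier (objective: simpler).

-- ===== PORT A =====
def NDSliceToLinear (slice_tuple : List (List Int)) (forShape : List Int) : List Int :=
  -- maxPrevSize = 1; nd_slice = len(slice_tuple); temp = slice_tuple[nd_slice-1]
  let nd : Int := slice_tuple.length
  let temp : List Int := PySem.List.pyGetD slice_tuple (nd - 1) []
  -- for it in range(nd_slice-2,-1,-1): prev = temp[:]; temp = []; maxPrevSize *= forShape[it+1];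
  --   for jt in range(len(slice_tuple[it])): temp += [x + slice_tuple[it][jt]*maxPrevSize for x in prev]
  let st := (PySem.List.pyRange (nd - 2) (-1) (-1)).foldl
    (fun (s : Int × List Int) it =>
      let prev := s.2
      let maxPrevSize := s.1 * PySem.List.pyGetD forShape (it + 1) 0
      let sl := PySem.List.pyGetD slice_tuple it []
      let temp := (PySem.List.pyRange 0 sl.length 1).foldl
        (fun t jt => t ++ prev.map (fun x => x + PySem.List.pyGetD sl jt 0 * maxPrevSize)) []
      (maxPrevSize, temp))
    (1, temp)
  st.2

-- ===== PORT B =====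
def NDSliceToLinear_alt (slice_tuple : List (List Int)) (forShape : List Int) : List Int :=
  -- strides = [1]; for d in range(nd-2,-1,-1): strides.insert(0, strides[0]*forShape[d+1])
  let nd : Int := slice_tuple.length
  let strides := (PySem.List.pyRange (nd - 2) (-1) (-1)).foldl
    (fun (s : List Int) d => (s.headD 1 * PySem.List.pyGetD forShape (d + 1) 0) :: s) [1]
  -- offsets = [0]; for idxs, stride in zip(slice_tuple, strides):
  --   offsets = [base + i * stride for base in offsets for i in idxs]
  (slice_tuple.zip strides).foldl
    (fun (offsets : List Int) p => offsets.flatMap (fun base => p.1.map (fun i => base + i * p.2)))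
    [0]

-- ===== PRECONDITION & SPEC =====
-- Pre_ excludes exactly the inputs on which A raises IndexError: the empty slice_tuple
-- (slice_tuple[-1]) and a forShape shorter than slice_tuple when there are ≥ 2 dimensions
-- (forShape[it+1] out of range).
def Pre_NDSliceToLinear (slice_tuple : List (List Int)) (forShape : List Int) : Prop :=
  slice_tuple ≠ [] ∧ (slice_tuple.length = 1 ∨ slice_tuple.length ≤ forShape.length)
instance (slice_tuple : List (List Int)) (forShape : List Int) : Decidable (Pre_NDSliceToLinear slice_tuple forShape) := by unfold Pre_NDSliceToLinear; infer_instance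

def pvWitness_NDSliceToLinear : List (List Int) × List Int := ([[1, 2], [0, 1], [1]], [4, 3, 2])

def Spec_NDSliceToLinear (slice_tuple : List (List Int)) (forShape : List Int) (out : List Int) : Prop := out = NDSliceToLinear_alt slice_tuple forShape
instance (slice_tuple : List (List Int)) (forShape : List Int) (out : List Int) : Decidable (Spec_NDSliceToLinear slice_tuple forShape out) := by unfold Spec_NDSliceToLinear; infer_instance

-- ===== CLAIM (what is proved, stated in full; the proofs are below) =====
def Claim_equal_NDSliceToLinear : Prop := ∀ (slice_tuple : List (List Int)) (forShape : List Int), Dom_NDSliceToLinear slice_tuple forShape → Pre_NDSliceToLinear slice_tuple forShape → Spec_NDSliceToLinear slice_tuple forShape (NDSliceToLinear slice_tuple forShape)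

-- ===== LEMMAS AND PROOFS =====

-- proof-side spec of the expansion: offsets of the product of dims, tuple base first
def pvExpand (dims : List (List Int × Int)) (base : Int) : List Int :=
  match dims with
  | [] => [base]
  | (idxs, stride) :: rest => idxs.flatMap (fun i => pvExpand rest (base + i * stride))

-- the common stride table: entry d is the product of forShape[d+1 .. nd-1]
def stridesSpec : List (List Int) → List Int → List Int
  | [], _ => []
  | _ :: rest, fsh => (fsh.tail.take rest.length).prod :: stridesSpec rest fsh.tail

-- pyRange with step -1 written as a map over List.range
theorem pyRangeNeg_eq (n : Nat) :
    PySem.List.pyRange (n : Int) (-1) (-1) = (List.range (n + 1)).map (fun k : Nat => (n : Int) - (k : Int)) := by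
  unfold PySem.List.pyRange
  rw [if_neg (by norm_num)]
  simp only [show ¬((0:Int) < -1) by norm_num, if_false, neg_neg,
    if_pos (show (-1:Int) < n by omega)]
  rw [show (((n : Int) - -1 + 1 - 1) / 1).toNat = n + 1 by omega]
  exact List.map_congr_left (fun k _ => by ring)

theorem pyRangeNeg0_eq (n : Nat) :
    PySem.List.pyRange (n : Int) 0 (-1) = (List.range n).map (fun k : Nat => (n : Int) - (k : Int)) := by
  unfold PySem.List.pyRange
  rw [if_neg (by norm_num)]
  simp only [show ¬((0:Int) < -1) by norm_num, if_false, neg_neg]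
  rcases Nat.eq_zero_or_pos n with h | h
  · subst h; simp
  · rw [if_pos (by exact_mod_cast h)]
    rw [show (((n : Int) - 0 + 1 - 1) / 1).toNat = n by omega]
    exact List.map_congr_left (fun k _ => by ring)

theorem pyRangeNeg_split (n : Nat) :
    PySem.List.pyRange (n : Int) (-1) (-1) = PySem.List.pyRange (n : Int) 0 (-1) ++ [0] := by
  rw [pyRangeNeg_eq, pyRangeNeg0_eq, List.range_succ, List.map_append]
  simp

theorem pyRangeNeg_shift (n : Nat) :
    PySem.List.pyRange (n : Int) 0 (-1)
      = (PySem.List.pyRange ((n : Int) - 1) (-1) (-1)).map (fun d => d + 1) := by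
  cases n with
  | zero =>
    rw [pyRangeNeg0_eq]
    simp only [Nat.cast_zero, List.range_zero, List.map_nil, zero_sub]
    rw [show PySem.List.pyRange (-1) (-1) (-1) = [] from rfl]
    simp
  | succ m =>
    rw [pyRangeNeg0_eq, show ((m + 1 : Nat) : Int) - 1 = (m : Int) by push_cast; ring, pyRangeNeg_eq]
    rw [List.map_map]
    exact List.map_congr_left (fun k _ => by simp [Function.comp]; ring)

theorem mem_pyRangeNeg {n : Nat} {d : Int} (hd : d ∈ PySem.List.pyRange ((n : Int) - 1) (-1) (-1)) :
    0 ≤ d := by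
  cases n with
  | zero =>
    rw [show ((0 : Nat) : Int) - 1 = -1 by norm_num, show PySem.List.pyRange (-1) (-1) (-1) = [] from rfl] at hd
    cases hd
  | succ m =>
    rw [show ((m + 1 : Nat) : Int) - 1 = (m : Int) by push_cast; ring, pyRangeNeg_eq] at hd
    obtain ⟨k, hk, rfl⟩ := List.mem_map.mp hd
    have := List.mem_range.mp hk
    omega

theorem pyGetD_cons_succ' {α : Type} (x : α) (t : List α) (i : Int) (h : 0 ≤ i) (dflt : α) :
    PySem.List.pyGetD (x :: t) (i + 1) dflt = PySem.List.pyGetD t i dflt := by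
  lift i to Nat using h
  rw [show ((i : Nat) : Int) + 1 = ((i + 1 : Nat) : Int) by push_cast; ring]
  rw [PySem.List.pyGetD_natCast, PySem.List.pyGetD_natCast]
  simp

theorem pvExpand_base (dims : List (List Int × Int)) (base : Int) :
    pvExpand dims base = (pvExpand dims 0).map (fun x => x + base) := by
  induction dims generalizing base with
  | nil => simp [pvExpand]
  | cons hd rest ih =>
    obtain ⟨idxs, stride⟩ := hd
    simp only [pvExpand, List.map_flatMap]
    exact List.flatMap_congr (fun i _ => by
      rw [ih (base + i * stride), ih (0 + i * stride), List.map_map]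
      exact List.map_congr_left (fun x _ => by simp [Function.comp]; ring))

-- B's forward offsets loop equals pvExpand from every accumulator
theorem foldl_expand (dims : List (List Int × Int)) (acc : List Int) :
    dims.foldl
        (fun (offsets : List Int) p => offsets.flatMap (fun base => p.1.map (fun i => base + i * p.2)))
        acc
      = acc.flatMap (fun b => pvExpand dims b) := by
  induction dims generalizing acc with
  | nil => simp [pvExpand]
  | cons hd rest ih =>
    obtain ⟨idxs, stride⟩ := hd
    rw [List.foldl_cons, ih]
    simp only [List.flatMap_assoc, List.flatMap_map, pvExpand]

theorem take_succ_prod (t : List Int) (k : Nat) (h : t ≠ []) :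
    (t.take (k + 1)).prod = t.headD 1 * (t.tail.take k).prod := by
  cases t with
  | nil => exact absurd rfl h
  | cons a t => simp [List.take_succ_cons]

theorem inner_fold_eq (sl prev : List Int) (m : Int) :
    (PySem.List.pyRange 0 sl.length 1).foldl
        (fun t jt => t ++ prev.map (fun x => x + PySem.List.pyGetD sl jt 0 * m)) []
      = sl.flatMap (fun i => prev.map (fun x => x + i * m)) := by
  rw [PySem.List.foldl_append_eq_flatMap]
  conv_rhs => rw [← PySem.List.map_pyGetD_pyRange_zero sl 0]
  rw [List.flatMap_map]
  simp [PySem.List.len]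

-- B's strides fold equals stridesSpec
theorem strides_eq (st : List (List Int)) (fsh : List Int)
    (h : st ≠ []) (hlen : st.length = 1 ∨ st.length ≤ fsh.length) :
    (PySem.List.pyRange ((st.length : Int) - 2) (-1) (-1)).foldl
        (fun (s : List Int) d => (s.headD 1 * PySem.List.pyGetD fsh (d + 1) 0) :: s) [1]
      = stridesSpec st fsh := by
  induction st generalizing fsh with
  | nil => exact absurd rfl h
  | cons l rest ih =>
    cases rest with
    | nil =>
      rw [show ((([l] : List (List Int)).length : Int) - 2) = -1 by norm_num,
        show PySem.List.pyRange (-1) (-1) (-1) = [] from rfl]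
      simp [stridesSpec]
    | cons r rr =>
      have hlen2 : (l :: r :: rr).length ≤ fsh.length := by
        rcases hlen with h1 | h1
        · simp at h1
        · exact h1
      cases fsh with
      | nil => simp at hlen2
      | cons f0 ft =>
        have hft : ft ≠ [] := by
          simp only [List.length_cons] at hlen2
          intro hc; subst hc; simp at hlen2
        rw [show (((l :: r :: rr : List (List Int)).length : Int) - 2) = ((rr.length : Nat) : Int) by
              simp only [List.length_cons]; push_cast; ring,
          pyRangeNeg_split rr.length, List.foldl_append,
          pyRangeNeg_shift rr.length, List.foldl_map]
        rw [PySem.List.foldl_congr_mem (PySem.List.pyRange ((rr.length : Int) - 1) (-1) (-1))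
            (fun (s : List Int) d => (s.headD 1 * PySem.List.pyGetD (f0 :: ft) (d + 1 + 1) 0) :: s)
            (fun (s : List Int) d => (s.headD 1 * PySem.List.pyGetD ft (d + 1) 0) :: s)
            [1]
            (fun s d hd => by
              dsimp only
              rw [pyGetD_cons_succ' f0 ft (d + 1) (by have := mem_pyRangeNeg hd; omega) 0])]
        rw [show ((rr.length : Nat) : Int) - 1 = (((r :: rr : List (List Int)).length : Int) - 2) by
              simp only [List.length_cons]; push_cast; ring]
        rw [ih ft (List.cons_ne_nil r rr)
              (Or.inr (by simp only [List.length_cons] at hlen2 ⊢; omega))]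
        simp only [List.foldl_cons, List.foldl_nil]
        show ((stridesSpec (r :: rr) ft).headD 1 * PySem.List.pyGetD (f0 :: ft) (0 + 1) 0)
              :: stridesSpec (r :: rr) ft = stridesSpec (l :: r :: rr) (f0 :: ft)
        simp only [stridesSpec, List.tail_cons, List.headD_cons, List.length_cons]
        congr 1
        rw [take_succ_prod ft rr.length hft,
          show (0 : Int) + 1 = ((1 : Nat) : Int) by norm_num, PySem.List.pyGetD_natCast]
        cases ft with
        | nil => exact absurd rfl hft
        | cons g gt => simp [mul_comm]

-- A's fold state characterised: final multiplier and pvExpand over the stride table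
theorem afold_eq (st : List (List Int)) (fsh : List Int)
    (h : st ≠ []) (hlen : st.length = 1 ∨ st.length ≤ fsh.length) :
    (PySem.List.pyRange ((st.length : Int) - 2) (-1) (-1)).foldl
        (fun (s : Int × List Int) it =>
          (s.1 * PySem.List.pyGetD fsh (it + 1) 0,
           (PySem.List.pyRange 0 (PySem.List.pyGetD st it []).length 1).foldl
             (fun t jt => t ++ s.2.map (fun x =>
               x + PySem.List.pyGetD (PySem.List.pyGetD st it []) jt 0
                     * (s.1 * PySem.List.pyGetD fsh (it + 1) 0))) []))
        (1, PySem.List.pyGetD st ((st.length : Int) - 1) [])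
      = ((fsh.tail.take (st.length - 1)).prod, pvExpand (st.zip (stridesSpec st fsh)) 0) := by
  induction st generalizing fsh with
  | nil => exact absurd rfl h
  | cons l rest ih =>
    cases rest with
    | nil =>
      rw [show ((([l] : List (List Int)).length : Int) - 2) = -1 by norm_num,
        show PySem.List.pyRange (-1) (-1) (-1) = [] from rfl]
      simp [stridesSpec, pvExpand]
    | cons r rr =>
      have hlen2 : (l :: r :: rr).length ≤ fsh.length := by
        rcases hlen with h1 | h1
        · simp at h1
        · exact h1
      cases fsh with
      | nil => simp at hlen2
      | cons f0 ft =>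
        have hft : ft ≠ [] := by
          simp only [List.length_cons] at hlen2
          intro hc; subst hc; simp at hlen2
        have hinit : PySem.List.pyGetD (l :: r :: rr) (((l :: r :: rr : List (List Int)).length : Int) - 1) []
            = PySem.List.pyGetD (r :: rr) (((r :: rr : List (List Int)).length : Int) - 1) [] := by
          rw [show (((l :: r :: rr : List (List Int)).length : Int) - 1)
                = ((((r :: rr : List (List Int)).length : Int) - 1) + 1) by
              simp only [List.length_cons]; push_cast; ring,
            pyGetD_cons_succ' l (r :: rr) _ (by simp only [List.length_cons]; push_cast; omega) []]
        rw [hinit]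
        rw [show (((l :: r :: rr : List (List Int)).length : Int) - 2) = ((rr.length : Nat) : Int) by
              simp only [List.length_cons]; push_cast; ring,
          pyRangeNeg_split rr.length, List.foldl_append,
          pyRangeNeg_shift rr.length, List.foldl_map]
        rw [PySem.List.foldl_congr_mem (PySem.List.pyRange ((rr.length : Int) - 1) (-1) (-1))
            (fun (s : Int × List Int) it =>
              (s.1 * PySem.List.pyGetD (f0 :: ft) (it + 1 + 1) 0,
               (PySem.List.pyRange 0 (PySem.List.pyGetD (l :: r :: rr) (it + 1) []).length 1).foldl
                 (fun t jt => t ++ s.2.map (fun x =>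
                   x + PySem.List.pyGetD (PySem.List.pyGetD (l :: r :: rr) (it + 1) []) jt 0
                         * (s.1 * PySem.List.pyGetD (f0 :: ft) (it + 1 + 1) 0))) []))
            (fun (s : Int × List Int) it =>
              (s.1 * PySem.List.pyGetD ft (it + 1) 0,
               (PySem.List.pyRange 0 (PySem.List.pyGetD (r :: rr) it []).length 1).foldl
                 (fun t jt => t ++ s.2.map (fun x =>
                   x + PySem.List.pyGetD (PySem.List.pyGetD (r :: rr) it []) jt 0
                         * (s.1 * PySem.List.pyGetD ft (it + 1) 0))) []))
            (1, PySem.List.pyGetD (r :: rr) (((r :: rr : List (List Int)).length : Int) - 1) [])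
            (fun s d hd => by
              have hd0 : (0 : Int) ≤ d := mem_pyRangeNeg hd
              dsimp only
              rw [pyGetD_cons_succ' f0 ft (d + 1) (by omega) 0,
                pyGetD_cons_succ' l (r :: rr) d hd0 []])]
        rw [show ((rr.length : Nat) : Int) - 1 = (((r :: rr : List (List Int)).length : Int) - 2) by
              simp only [List.length_cons]; push_cast; ring]
        rw [ih ft (List.cons_ne_nil r rr)
              (Or.inr (by simp only [List.length_cons] at hlen2 ⊢; omega))]
        simp only [List.foldl_cons, List.foldl_nil]
        have hM : (ft.tail.take ((r :: rr : List (List Int)).length - 1)).prod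
              * PySem.List.pyGetD (f0 :: ft) (0 + 1) 0 = (ft.take rr.length.succ).prod := by
          rw [take_succ_prod ft rr.length hft,
            show (0 : Int) + 1 = ((1 : Nat) : Int) by norm_num, PySem.List.pyGetD_natCast]
          cases ft with
          | nil => exact absurd rfl hft
          | cons g gt => simp [mul_comm]
        have hsl : PySem.List.pyGetD (l :: r :: rr) (0 : Int) [] = l := by
          rw [show (0 : Int) = ((0 : Nat) : Int) by norm_num, PySem.List.pyGetD_natCast]; rfl
        rw [hsl, hM, inner_fold_eq]
        rw [Prod.mk.injEq]
        refine ⟨?_, ?_⟩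
        · simp only [List.tail_cons, List.length_cons, Nat.succ_eq_add_one, Nat.add_sub_cancel]
        · simp only [Nat.succ_eq_add_one]
          rw [show stridesSpec (l :: r :: rr) (f0 :: ft)
                = (ft.take (rr.length + 1)).prod :: stridesSpec (r :: rr) ft from by
              simp [stridesSpec], List.zip_cons_cons]
          rw [show pvExpand ((l, (ft.take (rr.length + 1)).prod) :: (r :: rr).zip (stridesSpec (r :: rr) ft)) 0
                = l.flatMap (fun i => pvExpand ((r :: rr).zip (stridesSpec (r :: rr) ft))
                    (0 + i * (ft.take (rr.length + 1)).prod)) from rfl]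
          refine List.flatMap_congr (fun i _ => ?_)
          rw [pvExpand_base _ (0 + i * (ft.take (rr.length + 1)).prod)]
          refine List.map_congr_left (fun x _ => ?_)
          ring

-- ===== VERDICT (by name: the statement is the Claim_ definition above) =====
theorem NDSliceToLinear_spec : Claim_equal_NDSliceToLinear := by
  intro st fsh _ hpre
  unfold Spec_NDSliceToLinear
  have hA : NDSliceToLinear st fsh
      = ((PySem.List.pyRange ((st.length : Int) - 2) (-1) (-1)).foldl
          (fun (s : Int × List Int) it =>
            (s.1 * PySem.List.pyGetD fsh (it + 1) 0,
             (PySem.List.pyRange 0 (PySem.List.pyGetD st it []).length 1).foldl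
               (fun t jt => t ++ s.2.map (fun x =>
                 x + PySem.List.pyGetD (PySem.List.pyGetD st it []) jt 0
                       * (s.1 * PySem.List.pyGetD fsh (it + 1) 0))) []))
          (1, PySem.List.pyGetD st ((st.length : Int) - 1) [])).2 := rfl
  have hB : NDSliceToLinear_alt st fsh
      = (st.zip ((PySem.List.pyRange ((st.length : Int) - 2) (-1) (-1)).foldl
          (fun (s : List Int) d => (s.headD 1 * PySem.List.pyGetD fsh (d + 1) 0) :: s) [1])).foldl
          (fun (offsets : List Int) p => offsets.flatMap (fun base => p.1.map (fun i => base + i * p.2)))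
          [0] := rfl
  rw [hA, hB, strides_eq st fsh hpre.1 hpre.2, foldl_expand, afold_eq st fsh hpre.1 hpre.2]
  simp
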